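-- pv_equiv track=rewrite | github.com/cxrodgers/my | misc.py | sort_whisker_names
-- ===== SOURCE A (Python) =====
-- from builtins import str
--
-- def sort_whisker_names(curated_whiskers_as_dict):
--     """Sort whisker names in anatomical order.
--
--     curated_whiskers_as_dict : dict from object label to whisker name
--
--     Iterates through all values of `curated_whiskers_as_dict`. Sorts them
--     into junk (anything containing "junk"), unk (anything containing "unk"),
--     greeks (lowercase names), and real whiskers (the rest).
--
--     Returns: dict
--         'greek', 'real', 'junk', 'unk' : as above
--         'sorted_order' : greek + real + junk + unk
--     """
--     # Order: real, then junk, then unk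
--     junk_whiskers, unk_whiskers, greek_whiskers, real_whiskers = [], [], [], []
--     for whisker_name in list(curated_whiskers_as_dict.values()):
--         if 'junk' in whisker_name:
--             junk_whiskers.append(whisker_name)
--         elif 'unk' in whisker_name:
--             unk_whiskers.append(whisker_name)
--         elif str.islower(whisker_name):
--             greek_whiskers.append(whisker_name)
--         else:
--             real_whiskers.append(whisker_name)
--     sorted_whisker_names = (sorted(greek_whiskers) + sorted(real_whiskers) +
--         sorted(junk_whiskers) + sorted(unk_whiskers))
--
--     return {
--         'greek': greek_whiskers,
--         'junk': junk_whiskers,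
--         'unk': unk_whiskers,
--         'real': real_whiskers,
--         'sorted_order': sorted_whisker_names,
--     }
-- ===== SOURCE B (Python) =====
-- def sort_whisker_names(curated_whiskers_as_dict):
--     """Same result as A, but each bucket is built by its own filtering
--     comprehension over the values instead of one if/elif loop; since every
--     name containing 'junk' also contains 'unk', a single "'unk' not in w"
--     test suffices for the greek/real buckets."""
--     vals = list(curated_whiskers_as_dict.values())
--     junk_whiskers = [w for w in vals if 'junk' in w]
--     unk_whiskers = [w for w in vals if 'unk' in w and 'junk' not in w]
--     greek_whiskers = [w for w in vals if 'unk' not in w and w.islower()]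
--     real_whiskers = [w for w in vals if 'unk' not in w and not w.islower()]
--     return {
--         'greek': greek_whiskers,
--         'junk': junk_whiskers,
--         'unk': unk_whiskers,
--         'real': real_whiskers,
--         'sorted_order': sorted(greek_whiskers) + sorted(real_whiskers) +
--             sorted(junk_whiskers) + sorted(unk_whiskers),
--     }
-- ===== Notes on version B (the rewrite author's own statement) =====
-- stated objective: alternative
-- what changed: One if/elif classification loop with four accumulators is replaced by four independent filtering list comprehensions (using that 'junk' in w implies 'unk' in w, so greek/real only need a single negation), then the same four sorts.
import Mathlib
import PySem

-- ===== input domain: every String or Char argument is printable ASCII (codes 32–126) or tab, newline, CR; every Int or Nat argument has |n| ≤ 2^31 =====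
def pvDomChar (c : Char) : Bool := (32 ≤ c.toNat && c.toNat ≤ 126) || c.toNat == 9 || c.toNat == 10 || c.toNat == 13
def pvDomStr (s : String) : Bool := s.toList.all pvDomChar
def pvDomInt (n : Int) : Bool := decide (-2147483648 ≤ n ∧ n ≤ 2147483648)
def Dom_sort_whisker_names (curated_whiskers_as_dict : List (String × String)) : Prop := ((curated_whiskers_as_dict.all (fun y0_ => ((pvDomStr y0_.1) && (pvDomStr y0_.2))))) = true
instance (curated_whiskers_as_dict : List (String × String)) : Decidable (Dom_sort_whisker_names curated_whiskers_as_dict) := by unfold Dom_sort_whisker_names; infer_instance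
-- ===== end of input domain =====

-- B replaces A's single if/elif loop by four independent filters; same outputs (alternative decomposition, no speed claim).

-- str.islower(s): at least one cased character and no uppercase one — exact on the ASCII domain
-- (hand-ported: PySem has only the per-character islower/isupper).
def pyStrIslower (s : String) : Bool :=
  s.toList.any PySem.Chars.islower && s.toList.all (fun c => !PySem.Chars.isupper c)

-- ===== PORT A =====
def sort_whisker_names (curated_whiskers_as_dict : List (String × String)) : List (String × List String) :=
  let vals := (PySem.Dict.ofList curated_whiskers_as_dict).values
  let st := vals.foldl
    (fun (st : List String × List String × List String × List String) whisker_name =>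
      let (j, u, g, r) := st
      if PySem.Str.isIn "junk" whisker_name then (j ++ [whisker_name], u, g, r)
      else if PySem.Str.isIn "unk" whisker_name then (j, u ++ [whisker_name], g, r)
      else if pyStrIslower whisker_name then (j, u, g ++ [whisker_name], r)
      else (j, u, g, r ++ [whisker_name]))
    ([], [], [], [])
  let j := st.1; let u := st.2.1; let g := st.2.2.1; let r := st.2.2.2
  let sorted_whisker_names :=
    PySem.List.sorted g (fun x => x) false ++ PySem.List.sorted r (fun x => x) false ++
    PySem.List.sorted j (fun x => x) false ++ PySem.List.sorted u (fun x => x) false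
  [("greek", g), ("junk", j), ("unk", u), ("real", r), ("sorted_order", sorted_whisker_names)]

-- ===== PORT B =====
def sort_whisker_names_alt (curated_whiskers_as_dict : List (String × String)) : List (String × List String) :=
  let vals := (PySem.Dict.ofList curated_whiskers_as_dict).values
  let junk := vals.filter (fun w => PySem.Str.isIn "junk" w)
  let unk := vals.filter (fun w => PySem.Str.isIn "unk" w && !PySem.Str.isIn "junk" w)
  let greek := vals.filter (fun w => !PySem.Str.isIn "unk" w && pyStrIslower w)
  let real := vals.filter (fun w => !PySem.Str.isIn "unk" w && !pyStrIslower w)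
  [("greek", greek), ("junk", junk), ("unk", unk), ("real", real),
   ("sorted_order",
     PySem.List.sorted greek (fun x => x) false ++ PySem.List.sorted real (fun x => x) false ++
     PySem.List.sorted junk (fun x => x) false ++ PySem.List.sorted unk (fun x => x) false)]

-- ===== PRECONDITION & SPEC =====
def Spec_sort_whisker_names (curated_whiskers_as_dict : List (String × String)) (out : List (String × List String)) : Prop := out = sort_whisker_names_alt curated_whiskers_as_dict
instance (curated_whiskers_as_dict : List (String × String)) (out : List (String × List String)) : Decidable (Spec_sort_whisker_names curated_whiskers_as_dict out) := by unfold Spec_sort_whisker_names; infer_instance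

-- ===== CLAIM (what is proved, stated in full; the proofs are below) =====
def Claim_equal_sort_whisker_names : Prop := ∀ (curated_whiskers_as_dict : List (String × String)), Dom_sort_whisker_names curated_whiskers_as_dict → Spec_sort_whisker_names curated_whiskers_as_dict (sort_whisker_names curated_whiskers_as_dict)

-- ===== LEMMAS AND PROOFS =====

-- "junk" occurring in a string forces "unk" to occur in it ('unk' is a suffix of 'junk').
theorem junk_implies_unk (s : String) :
    PySem.Str.isIn "junk" s = true → PySem.Str.isIn "unk" s = true := by
  intro h
  rw [PySem.Str.isIn_iff_infix] at h ⊢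
  exact List.IsInfix.trans (by decide : "unk".toList <:+: "junk".toList) h

-- The classification loop equals the four elif-chain filters, accumulators generalized.
theorem loopA_eq_filters (vs : List String)
    (j u g r : List String) :
    vs.foldl
      (fun (st : List String × List String × List String × List String) w =>
        let (j, u, g, r) := st
        if PySem.Str.isIn "junk" w then (j ++ [w], u, g, r)
        else if PySem.Str.isIn "unk" w then (j, u ++ [w], g, r)
        else if pyStrIslower w then (j, u, g ++ [w], r)
        else (j, u, g, r ++ [w])) (j, u, g, r)
    = (j ++ vs.filter (fun w => PySem.Str.isIn "junk" w),
       u ++ vs.filter (fun w => PySem.Str.isIn "unk" w && !PySem.Str.isIn "junk" w),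
       g ++ vs.filter (fun w => !PySem.Str.isIn "unk" w && pyStrIslower w),
       r ++ vs.filter (fun w => !PySem.Str.isIn "unk" w && !pyStrIslower w)) := by
  induction vs generalizing j u g r with
  | nil => simp
  | cons w vs ih =>
    rw [List.foldl_cons]
    by_cases hj : PySem.Str.isIn "junk" w = true
    · have hu := junk_implies_unk w hj
      have hjC := hj; have huC := hu
      simp at hjC huC
      dsimp only
      rw [if_pos hj, ih]
      simp [hjC, huC]
    · by_cases hu : PySem.Str.isIn "unk" w = true
      · have hjC := hj; have huC := hu
        simp at hjC huC
        dsimp only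
        rw [if_neg hj, if_pos hu, ih]
        simp [hjC, huC]
      · have hjC := hj; have huC := hu
        simp at hjC huC
        by_cases hl : pyStrIslower w = true
        · dsimp only
          rw [if_neg hj, if_neg hu, if_pos hl, ih]
          simp [hjC, huC, hl]
        · dsimp only
          rw [if_neg hj, if_neg hu, if_neg hl, ih]
          simp [hjC, huC, hl]

-- ===== VERDICT (by name: the statement is the Claim_ definition above) =====
theorem sort_whisker_names_spec : Claim_equal_sort_whisker_names := by
  intro d _
  show sort_whisker_names d = sort_whisker_names_alt d
  unfold sort_whisker_names sort_whisker_names_alt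
  dsimp only
  rw [loopA_eq_filters]
  simp
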